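-- pv_equiv track=rewrite | github.com/season-lab/symnav | analyses/tree_pruner.py | check_blacklisted_edges
-- ===== SOURCE A (Python) =====
-- def check_blacklisted_edges(path, edges_black):
--     """ check whether all black-list edges do not exceed max count """
--     edges = list()
--     for b1, b2 in zip(path, path[1:]):
--         edges.append((b1, b2))
--
--     tmp_edges_black = dict(edges_black)
--     for b1, b2 in edges:
--         if (b1, b2) in tmp_edges_black:
--             tmp_edges_black[(b1, b2)] -= 1
--             if tmp_edges_black[(b1, b2)] < 0:
--                 return False
--     return True
-- ===== SOURCE B (Python) =====
-- def check_blacklisted_edges(path, edges_black):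
--     """check whether all black-list edges do not exceed max count"""
--     counts = {}
--     for edge in zip(path, path[1:]):
--         counts[edge] = counts.get(edge, 0) + 1
--     for edge, c in counts.items():
--         if edge in edges_black and c > edges_black[edge]:
--             return False
--     return True
-- ===== Notes on version B (the rewrite author's own statement) =====
-- stated objective: simpler
-- what changed: B tallies the path's consecutive edges into a count dictionary in one pass and then compares each distinct edge's total count against the blacklist allowance, instead of A's copy-the-blacklist-and-decrement-while-scanning loop with an early return.
import Mathlib
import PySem

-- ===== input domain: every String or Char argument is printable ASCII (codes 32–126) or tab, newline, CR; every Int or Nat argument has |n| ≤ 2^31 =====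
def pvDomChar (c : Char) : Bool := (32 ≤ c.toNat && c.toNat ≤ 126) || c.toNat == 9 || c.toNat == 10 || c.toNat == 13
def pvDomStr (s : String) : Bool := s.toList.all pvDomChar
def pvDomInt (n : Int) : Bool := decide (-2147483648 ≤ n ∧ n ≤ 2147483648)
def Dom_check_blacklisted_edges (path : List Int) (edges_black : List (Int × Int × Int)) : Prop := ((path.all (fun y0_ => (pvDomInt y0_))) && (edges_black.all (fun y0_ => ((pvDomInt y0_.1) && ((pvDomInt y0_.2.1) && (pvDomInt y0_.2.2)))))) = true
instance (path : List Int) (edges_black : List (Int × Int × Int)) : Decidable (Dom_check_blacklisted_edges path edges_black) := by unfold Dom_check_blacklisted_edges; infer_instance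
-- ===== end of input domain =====

-- B replaces A's copy-and-decrement scan of the blacklist with a one-pass edge tally compared against the allowances (objective: simpler); same cost.


-- ===== PORT A =====
-- edge-by-edge scan over a private decrementing copy of the blacklist, early False
def goA (edges : List (Int × Int)) (d : PySem.Dict (Int × Int) Int) : Bool :=
  match edges with
  | [] => true
  | e :: rest =>
      if d.contains e then
        let d' := d.insert e (d.getD e 0 - 1)
        if d'.getD e 0 < 0 then false else goA rest d'
      else goA rest d

def check_blacklisted_edges (path : List Int) (edges_black : List (Int × Int × Int)) : Bool :=
  let edges := path.zip path.tail
  let tmp := PySem.Dict.ofList (edges_black.map (fun t => ((t.1, t.2.1), t.2.2)))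
  goA edges tmp

-- ===== PORT B =====
-- compare each distinct edge's tallied count against its blacklist allowance
def goB (eb : PySem.Dict (Int × Int) Int) (items : List ((Int × Int) × Int)) : Bool :=
  match items with
  | [] => true
  | (e, c) :: rest =>
      if eb.contains e && decide (eb.getD e 0 < c) then false else goB eb rest

def check_blacklisted_edges_alt (path : List Int) (edges_black : List (Int × Int × Int)) : Bool :=
  let eb := PySem.Dict.ofList (edges_black.map (fun t => ((t.1, t.2.1), t.2.2)))
  let counts := (path.zip path.tail).foldl (fun d e => d.insert e (d.getD e 0 + 1)) PySem.Dict.empty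
  goB eb counts.items

-- ===== PRECONDITION & SPEC =====
def Spec_check_blacklisted_edges (path : List Int) (edges_black : List (Int × Int × Int)) (out : Bool) : Prop := out = check_blacklisted_edges_alt path edges_black
instance (path : List Int) (edges_black : List (Int × Int × Int)) (out : Bool) : Decidable (Spec_check_blacklisted_edges path edges_black out) := by unfold Spec_check_blacklisted_edges; infer_instance

-- ===== CLAIM (what is proved, stated in full; the proofs are below) =====
def Claim_equal_check_blacklisted_edges : Prop := ∀ (path : List Int) (edges_black : List (Int × Int × Int)), Dom_check_blacklisted_edges path edges_black → Spec_check_blacklisted_edges path edges_black (check_blacklisted_edges path edges_black)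

-- ===== LEMMAS AND PROOFS =====

-- A's scan returns true iff no tracked key occurs in the remaining edges more often than its stored budget
theorem goA_char (edges : List (Int × Int)) (d : PySem.Dict (Int × Int) Int) :
    goA edges d = true ↔
      ∀ e v, d.get? e = some v → (edges.count e = 0 ∨ (edges.count e : Int) ≤ v) := by
  induction edges generalizing d with
  | nil => simp [goA]
  | cons e rest ih =>
    by_cases hc : d.contains e = true
    · obtain ⟨v, hv⟩ : ∃ v, d.get? e = some v := by
        rcases h : d.get? e with _ | v
        · rw [PySem.Dict.contains_eq_isSome_get?, h] at hc; simp at hc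
        · exact ⟨v, rfl⟩
      have hgd : d.getD e 0 = v := PySem.Dict.getD_of_get?_eq_some _ _ hv
      simp only [goA, hc, if_true, hgd]
      rw [PySem.Dict.getD_insert_self]
      by_cases hneg : v - 1 < 0
      · simp only [hneg, if_true]
        constructor
        · intro h; cases h
        · intro h
          have := h e v hv
          have hcnt : (e :: rest).count e = rest.count e + 1 := by simp
          omega
      · simp only [hneg, if_false, ih]
        constructor
        · intro h e' v' hv'
          by_cases he : e' = e
          · subst he
            rw [hv] at hv'
            injection hv' with hvv
            have := h e' (v - 1) (by rw [PySem.Dict.get?_insert, if_pos rfl])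
            have hcnt : (e' :: rest).count e' = rest.count e' + 1 := by simp
            omega
          · have := h e' v' (by rw [PySem.Dict.get?_insert, if_neg he]; exact hv')
            have hcnt : (e :: rest).count e' = rest.count e' := by
              simp [Ne.symm he]
            omega
        · intro h e' v' hv'
          by_cases he : e' = e
          · subst he
            rw [PySem.Dict.get?_insert, if_pos rfl] at hv'
            injection hv' with hv''
            have := h e' v hv
            have hcnt : (e' :: rest).count e' = rest.count e' + 1 := by simp
            omega
          · rw [PySem.Dict.get?_insert, if_neg he] at hv'
            have := h e' v' hv'
            have hcnt : (e :: rest).count e' = rest.count e' := by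
              simp [Ne.symm he]
            omega
    · have hn : d.get? e = none := by
        rcases h : d.get? e with _ | v
        · rfl
        · rw [PySem.Dict.contains_eq_isSome_get?, h] at hc; simp at hc
      simp only [goA, hc, Bool.false_eq_true, if_false, ih]
      constructor
      · intro h e' v' hv'
        have hne : e' ≠ e := fun he => by subst he; rw [hn] at hv'; simp at hv'
        have := h e' v' hv'
        have hcnt : (e :: rest).count e' = rest.count e' := by
          simp [Ne.symm hne]
        omega
      · intro h e' v' hv'
        have hne : e' ≠ e := fun he => by subst he; rw [hn] at hv'; simp at hv'
        have := h e' v' hv'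
        have hcnt : (e :: rest).count e' = rest.count e' := by
          simp [Ne.symm hne]
        omega

-- B's item scan returns true iff every listed (edge, count) within the blacklist stays within its allowance
theorem goB_char (eb : PySem.Dict (Int × Int) Int) (items : List ((Int × Int) × Int)) :
    goB eb items = true ↔ ∀ p ∈ items, eb.contains p.1 = true → p.2 ≤ eb.getD p.1 0 := by
  induction items with
  | nil => simp [goB]
  | cons p rest ih =>
    obtain ⟨e, c⟩ := p
    by_cases h : eb.contains e = true ∧ eb.getD e 0 < c
    · simp only [goB, h.1, h.2, decide_true, Bool.and_true, if_true]
      constructor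
      · intro hf; cases hf
      · intro hall
        have := hall (e, c) (List.mem_cons_self) h.1
        simp only at this
        omega
    · have hcond : (eb.contains e && decide (eb.getD e 0 < c)) = false := by
        rcases Decidable.em (eb.contains e = true) with hc | hc
        · have : ¬ eb.getD e 0 < c := fun hl => h ⟨hc, hl⟩
          simp [hc, this]
        · simp [Bool.eq_false_iff.mpr hc]
      simp only [goB, hcond, Bool.false_eq_true, if_false, ih]
      constructor
      · intro hall q hq hcq
        rcases List.mem_cons.mp hq with hq | hq
        · subst hq
          simp only at hcq ⊢
          have : ¬ eb.getD e 0 < c := fun hl => h ⟨hcq, hl⟩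
          omega
        · exact hall q hq hcq
      · intro hall q hq hcq
        exact hall q (List.mem_cons_of_mem _ hq) hcq

-- the tally loop is Counter(edges); its items list each distinct edge with its count
theorem counts_items (edges : List (Int × Int)) :
    (edges.foldl (fun d e => d.insert e (d.getD e 0 + 1)) PySem.Dict.empty).items
      = (PySem.Set.ofList edges).map (fun k => (k, (edges.count k : Int))) := by
  rw [PySem.Dict.foldl_insert_getD_add_one_eq_counter, PySem.Dict.items_counter]

-- ===== VERDICT (by name: the statement is the Claim_ definition above) =====
theorem check_blacklisted_edges_spec : Claim_equal_check_blacklisted_edges := by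
  intro path edges_black _
  unfold Spec_check_blacklisted_edges check_blacklisted_edges check_blacklisted_edges_alt
  simp only [counts_items]
  set edges := path.zip path.tail with hedges
  set eb := PySem.Dict.ofList (edges_black.map (fun t => ((t.1, t.2.1), t.2.2))) with heb
  rcases hA : goA edges eb with _ | _ <;>
    rcases hB : goB eb ((PySem.Set.ofList edges).map (fun k => (k, (edges.count k : Int)))) with _ | _
  · rfl
  · exfalso
    rw [goB_char] at hB
    rw [← Bool.not_eq_true, goA_char] at hA
    apply hA
    intro e v hv
    by_cases he : e ∈ edges
    · have hmem : (e, (edges.count e : Int)) ∈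
          (PySem.Set.ofList edges).map (fun k => (k, (edges.count k : Int))) :=
        List.mem_map_of_mem ((PySem.Set.mem_ofList edges e).mpr he)
      have hcont : eb.contains e = true := by
        rw [PySem.Dict.contains_eq_isSome_get?, hv]; rfl
      have := hB _ hmem hcont
      simp only at this
      have hgd : eb.getD e 0 = v := PySem.Dict.getD_of_get?_eq_some _ _ hv
      omega
    · exact Or.inl (List.count_eq_zero.mpr he)
  · exfalso
    rw [goA_char] at hA
    rw [← Bool.not_eq_true, goB_char] at hB
    apply hB
    intro p hp hcp
    obtain ⟨k, hk, hpk⟩ := List.mem_map.mp hp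
    subst hpk
    simp only at hcp ⊢
    obtain ⟨v, hv⟩ : ∃ v, eb.get? k = some v := by
      rcases h : eb.get? k with _ | v
      · rw [PySem.Dict.contains_eq_isSome_get?, h] at hcp; simp at hcp
      · exact ⟨v, rfl⟩
    have hgd : eb.getD k 0 = v := PySem.Dict.getD_of_get?_eq_some _ _ hv
    have hle := hA k v hv
    have hkmem : k ∈ edges := (PySem.Set.mem_ofList edges k).mp hk
    have hpos : 0 < edges.count k := List.count_pos_iff.mpr hkmem
    omega
  · rfl
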